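-- pv_equiv track=rewrite | github.com/teljoa/programacion | python/Tema2/Modular Programming II/boletin/boletin/ejercicio6.py | getNumberOfDigitsHexa
-- ===== SOURCE A (Python) =====
-- def getNumberOfDigitsHexa(cad):
--     cad = str(cad).upper()
--     k=0
--     decimal = False
--     for n in range(len(cad)):
--         if cad[n] in '01234567890ABCDEF':
--             k +=1
--         elif cad[n] == '.' and not decimal and (n != (len(cad)-1)) and (n != 0):
--             if (n == 1 and (cad [0] in '+-')):
--                 return None
--             else:
--                 decimal = True
--         elif (cad[n] == '+' or cad[n] == '-') and n == 0:
--             pass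
--         else:
--             return None
--     return k
-- ===== SOURCE B (Python) =====
-- _HEX = set('0123456789ABCDEF')
--
--
-- def getNumberOfDigitsHexa(cad):
--     # Strip an optional leading sign, split on the dot separator, and classify the parts:
--     # one all-hex part (integer form) or two non-empty all-hex parts (decimal form).
--     s = str(cad).upper()
--     if s[:1] in ('+', '-'):
--         s = s[1:]
--     parts = s.split('.')
--     if not all(c in _HEX for p in parts for c in p):
--         return None
--     if len(parts) == 1:
--         return len(s)
--     if len(parts) == 2 and parts[0] and parts[1]:
--         return len(s) - 1
--     return None
-- ===== Notes on version B (the rewrite author's own statement) =====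
-- stated objective: simpler
-- what changed: Replaced the stateful index loop (hex counter + decimal flag + positional sign/dot guards) by a declarative parse: strip an optional leading sign, split once on the dot separator, and accept either one all-hex part or two non-empty all-hex parts, returning the digit count from the lengths.
import Mathlib
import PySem

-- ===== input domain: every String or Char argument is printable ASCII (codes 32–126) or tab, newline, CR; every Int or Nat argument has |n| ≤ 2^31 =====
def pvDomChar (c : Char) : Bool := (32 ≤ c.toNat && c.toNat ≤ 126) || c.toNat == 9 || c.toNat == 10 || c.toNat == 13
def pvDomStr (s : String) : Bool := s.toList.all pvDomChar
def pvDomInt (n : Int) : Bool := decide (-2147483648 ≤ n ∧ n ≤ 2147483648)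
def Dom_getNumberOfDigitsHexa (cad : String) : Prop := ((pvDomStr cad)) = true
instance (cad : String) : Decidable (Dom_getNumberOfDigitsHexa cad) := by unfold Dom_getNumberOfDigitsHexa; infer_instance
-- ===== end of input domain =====

-- B replaces A's stateful index loop by a sign-strip + split-on-dot classification (simpler decomposition).

-- ===== PORT A =====
-- A's `for n in range(len(cad))`: `rest` is the unvisited suffix cad[n:], `first` is cad[0]
-- (consulted only by the `n == 1 and cad[0] in '+-'` guard); branches in A's order.
def pvLoopA (first : Option Char) (rest : List Char) (n : Nat) (k : Int) (decimal : Bool) :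
    Option Int :=
  match rest with
  | [] => some k
  | c :: tl =>
    if ("01234567890ABCDEF".toList).contains c then
      pvLoopA first tl (n + 1) (k + 1) decimal
    else if c = '.' ∧ decimal = false ∧ tl ≠ [] ∧ n ≠ 0 then
      if n = 1 ∧ (first = some '+' ∨ first = some '-') then none
      else pvLoopA first tl (n + 1) k true
    else if (c = '+' ∨ c = '-') ∧ n = 0 then
      pvLoopA first tl (n + 1) k decimal
    else none

def getNumberOfDigitsHexa (cad : String) : Option Int :=
  -- cad = str(cad).upper(); str() is the identity on a str argument
  pvLoopA ((PySem.Str.upper cad).toList).head? ((PySem.Str.upper cad).toList) 0 0 false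

-- ===== PORT B =====
def pvIsHex (c : Char) : Bool := ("0123456789ABCDEF".toList).contains c

-- hand port of Python s.split('.') (exact for a single-character separator: keeps empty pieces)
def pvSplitDot (cs : List Char) : List (List Char) :=
  match cs with
  | [] => [[]]
  | c :: tl =>
    let ps := pvSplitDot tl
    if c = '.' then [] :: ps
    else
      match ps with
      | p :: rest => (c :: p) :: rest
      | [] => [[c]]

-- `if s[:1] in ('+','-'): s = s[1:]`
def pvStripSign (s0 : List Char) : List Char :=
  match s0 with
  | c :: tl => if c = '+' ∨ c = '-' then tl else s0
  | [] => s0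

-- body of Source B after the sign strip
def pvBcore (s : List Char) : Option Int :=
  let parts := pvSplitDot s
  if ¬ (parts.all (fun p => p.all pvIsHex)) then none
  else if parts.length = 1 then some (s.length : Int)
  else if parts.length = 2 ∧ parts.head? ≠ some [] ∧ parts.getLast? ≠ some [] then
    some ((s.length : Int) - 1)
  else none

def getNumberOfDigitsHexa_alt (cad : String) : Option Int :=
  pvBcore (pvStripSign ((PySem.Str.upper cad).toList))

-- ===== PRECONDITION & SPEC =====
def Spec_getNumberOfDigitsHexa (cad : String) (out : Option Int) : Prop := out = getNumberOfDigitsHexa_alt cad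
instance (cad : String) (out : Option Int) : Decidable (Spec_getNumberOfDigitsHexa cad out) := by unfold Spec_getNumberOfDigitsHexa; infer_instance

-- ===== CLAIM (what is proved, stated in full; the proofs are below) =====
def Claim_equal_getNumberOfDigitsHexa : Prop := ∀ (cad : String), Dom_getNumberOfDigitsHexa cad → Spec_getNumberOfDigitsHexa cad (getNumberOfDigitsHexa cad)

-- ===== LEMMAS AND PROOFS =====

-- A's hex literal has a duplicated '0'; same character set as B's
theorem hex_sets_eq (c : Char) :
    ("01234567890ABCDEF".toList).contains c = pvIsHex c := by
  rw [pvIsHex]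
  rw [show "01234567890ABCDEF".toList = "0123456789".toList ++ "0ABCDEF".toList by decide]
  rw [show "0123456789ABCDEF".toList = "0123456789".toList ++ "ABCDEF".toList by decide]
  rw [show "0ABCDEF".toList = '0' :: "ABCDEF".toList by decide]
  simp only [List.contains_append, List.contains_cons]
  cases h : "0123456789".toList.contains c
  · by_cases h0 : c = '0'
    · subst h0; exact absurd h (by decide)
    · simp [h0]
  · simp

theorem pvIsHex_dot : pvIsHex '.' = false := by decide

-- split at the FIRST dot: proof-side view of A's scan
def pvFirstDot (s : List Char) : Option (List Char × List Char) :=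
  match s with
  | [] => none
  | c :: tl =>
    if c = '.' then some ([], tl)
    else (pvFirstDot tl).map (fun ab => (c :: ab.1, ab.2))

-- what A's loop computes from any pre-dot position, phrased on the first-dot split
def pvFk (rest : List Char) (k : Int) : Option Int :=
  match pvFirstDot rest with
  | none => if rest.all pvIsHex then some (k + rest.length) else none
  | some (a, b) =>
    if a.all pvIsHex ∧ b ≠ [] ∧ b.all pvIsHex then some (k + a.length + b.length) else none

theorem splitDot_ne_nil (s : List Char) : pvSplitDot s ≠ [] := by
  cases s with
  | nil => simp [pvSplitDot]
  | cons c tl =>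
    rw [pvSplitDot]
    by_cases hc : c = '.'
    · simp [hc]
    · simp only [hc, if_false]
      cases pvSplitDot tl with
      | nil => simp
      | cons p r => simp

theorem firstDot_none (s : List Char) (h : pvFirstDot s = none) : pvSplitDot s = [s] := by
  induction s with
  | nil => simp [pvSplitDot]
  | cons c tl ih =>
    rw [pvFirstDot] at h
    by_cases hc : c = '.'
    · simp [hc] at h
    · simp only [hc, if_false, Option.map_eq_none_iff] at h
      simp [pvSplitDot, hc, ih h]

theorem firstDot_some (s a b : List Char) (h : pvFirstDot s = some (a, b)) :
    pvSplitDot s = a :: pvSplitDot b ∧ s = a ++ '.' :: b := by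
  induction s generalizing a with
  | nil => simp [pvFirstDot] at h
  | cons c tl ih =>
    rw [pvFirstDot] at h
    by_cases hc : c = '.'
    · simp only [hc, if_true, Option.some.injEq, Prod.mk.injEq] at h
      obtain ⟨h1, h2⟩ := h
      subst h2; subst hc
      rw [← h1]
      simp [pvSplitDot]
    · simp only [hc, if_false, Option.map_eq_some_iff] at h
      obtain ⟨⟨a', b'⟩, hfd, heq⟩ := h
      obtain ⟨h1, h2⟩ := Prod.mk.injEq .. ▸ heq
      subst h2
      rw [← h1]
      obtain ⟨ihs, ihd⟩ := ih a' hfd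
      constructor
      · rw [pvSplitDot]
        simp only [hc, if_false, ihs]
      · rw [ihd]; simp

-- ===== A-side characterisation =====

-- after the dot (decimal = True) every remaining char must be a hex digit
theorem loopA_afterDot (first : Option Char) (rest : List Char) (n : Nat) (k : Int)
    (hn : n ≠ 0) :
    pvLoopA first rest n k true =
      if rest.all pvIsHex then some (k + rest.length) else none := by
  induction rest generalizing n k with
  | nil => simp [pvLoopA]
  | cons c tl ih =>
    rw [pvLoopA, hex_sets_eq]
    by_cases hc : pvIsHex c = true
    · rw [if_pos hc, ih (n + 1) (k + 1) (by omega)]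
      by_cases h2 : tl.all pvIsHex
      · simp [h2, hc]; push_cast; ring
      · simp [h2, hc]
    · rw [if_neg hc, if_neg (by simp), if_neg (by rintro ⟨_, rfl⟩; exact hn rfl)]
      simp [hc]

-- before the dot, from any position n ≥ 1 that is not "n = 1 with a leading sign"
theorem loopA_main (first : Option Char) (rest : List Char) (n : Nat) (k : Int)
    (hn : n ≠ 0) (h1 : ¬ (n = 1 ∧ (first = some '+' ∨ first = some '-'))) :
    pvLoopA first rest n k false = pvFk rest k := by
  induction rest generalizing n k with
  | nil => simp [pvLoopA, pvFk, pvFirstDot]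
  | cons c tl ih =>
    rw [pvLoopA, hex_sets_eq]
    by_cases hc : pvIsHex c = true
    · have hcd : c ≠ '.' := by intro h; rw [h] at hc; simp [pvIsHex_dot] at hc
      rw [if_pos hc, ih (n + 1) (k + 1) (by omega) (by omega)]
      rw [pvFk, pvFk, pvFirstDot, if_neg hcd]
      cases hfd : pvFirstDot tl with
      | none =>
        simp only [Option.map_none]
        by_cases h2 : tl.all pvIsHex <;> simp [h2, hc] <;> push_cast <;> ring
      | some ab =>
        obtain ⟨a, b⟩ := ab
        simp only [Option.map_some]
        by_cases h2 : a.all pvIsHex ∧ b ≠ [] ∧ b.all pvIsHex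
        · rw [if_pos h2, if_pos (by simp only [List.all_cons, hc, Bool.true_and]; exact h2)]
          simp; push_cast; ring
        · rw [if_neg h2, if_neg (by
            intro hco; apply h2
            simpa only [List.all_cons, hc, Bool.true_and] using hco)]
    · rw [if_neg hc]
      by_cases hcd : c = '.'
      · subst hcd
        by_cases ht : tl = []
        · subst ht
          rw [if_neg (by rintro ⟨_, _, h, _⟩; exact h rfl),
              if_neg (by rintro ⟨h, _⟩; cases h <;> simp_all)]
          simp [pvFk, pvFirstDot]
        · rw [if_pos ⟨rfl, rfl, ht, hn⟩, if_neg h1,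
              loopA_afterDot first tl (n + 1) k (by omega)]
          rw [pvFk, pvFirstDot, if_pos rfl]
          by_cases h2 : tl.all pvIsHex <;> simp [h2, ht]
      · rw [if_neg (by rintro ⟨h, _⟩; exact hcd h),
            if_neg (by rintro ⟨_, h⟩; exact hn h)]
        rw [pvFk, pvFirstDot, if_neg hcd]
        cases hfd : pvFirstDot tl with
        | none => simp [hc]
        | some ab =>
          obtain ⟨a, b⟩ := ab
          simp [hc]

-- ===== B-side characterisation =====

theorem bcore_nil : pvBcore [] = some 0 := by decide

theorem bcore_dot (t : List Char) : pvBcore ('.' :: t) = none := by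
  rw [pvBcore]
  have hsp : pvSplitDot ('.' :: t) = [] :: pvSplitDot t := by rw [pvSplitDot]; simp
  cases hps : pvSplitDot t with
  | nil => exact absurd hps (splitDot_ne_nil t)
  | cons p r =>
    by_cases hall : (([] :: p :: r).all (fun p => p.all pvIsHex)) = true
    · simp only [hsp, hps, hall]
      simp only [not_true, if_false]
      cases r with
      | nil => simp
      | cons q r2 => simp
    · simp [hsp, hps, hall]

theorem bcore_bad (c : Char) (t : List Char) (hc : pvIsHex c = false) (hcd : c ≠ '.') :
    pvBcore (c :: t) = none := by
  rw [pvBcore]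
  cases hps : pvSplitDot t with
  | nil => exact absurd hps (splitDot_ne_nil t)
  | cons p r =>
    have hsp : pvSplitDot (c :: t) = (c :: p) :: r := by
      rw [pvSplitDot]; simp [hcd, hps]
    have : ¬ (((c :: p) :: r).all (fun p => p.all pvIsHex)) = true := by simp [hc]
    simp [hsp, this]

theorem bcore_hex (c : Char) (t : List Char) (hc : pvIsHex c = true) :
    pvBcore (c :: t) = pvFk t 1 := by
  have hcd : c ≠ '.' := by intro h; rw [h] at hc; simp [pvIsHex_dot] at hc
  rw [pvBcore, pvFk]
  cases hfd : pvFirstDot t with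
  | none =>
    have hsp2 : pvSplitDot t = [t] := firstDot_none t hfd
    have hsp : pvSplitDot (c :: t) = [c :: t] := by
      rw [pvSplitDot]; simp [hcd, hsp2]
    by_cases h2 : t.all pvIsHex <;> simp [hsp, h2, hc] <;> push_cast <;> ring
  | some ab =>
    obtain ⟨a, b⟩ := ab
    obtain ⟨hsp2, hdecomp⟩ := firstDot_some t a b hfd
    have hsp : pvSplitDot (c :: t) = (c :: a) :: pvSplitDot b := by
      rw [pvSplitDot]; simp [hcd, hsp2]
    cases hfb : pvFirstDot b with
    | none =>
      have hb : pvSplitDot b = [b] := firstDot_none b hfb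
      have hlen : (t.length : Int) = a.length + 1 + b.length := by
        subst hdecomp; push_cast; simp; omega
      rw [hsp, hb]
      by_cases ha : a.all pvIsHex
      · by_cases hb2 : b.all pvIsHex
        · by_cases hbe : b = []
          · subst hbe
            simp [hc, ha, hb2]
          · simp only [List.all_cons, hc, Bool.true_and, List.all_nil]
            simp [ha, hb2, hbe, hlen]
            push_cast; ring
        · simp [hc, ha, hb2]
      · simp [hc, ha]
    | some ab2 =>
      obtain ⟨a2, b2⟩ := ab2
      obtain ⟨hb, hdec2⟩ := firstDot_some b a2 b2 hfb
      have hball : b.all pvIsHex = false := by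
        rw [hdec2]
        simp [List.all_append, pvIsHex_dot]
      rw [hsp, hb]
      cases hq : pvSplitDot b2 with
      | nil => exact absurd hq (splitDot_ne_nil b2)
      | cons p r =>
        by_cases hall : (((c :: a) :: a2 :: p :: r).all fun x => x.all pvIsHex) = true
        · rw [if_neg (fun hcon => hcon hall)]
          rw [if_neg (by simp)]
          rw [if_neg (by rintro ⟨h2, -⟩; simp at h2)]
          simp [hball]
        · rw [if_pos hall]
          simp [hball]

-- ===== assembly =====

theorem main_list (cs : List Char) :
    pvLoopA cs.head? cs 0 0 false = pvBcore (pvStripSign cs) := by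
  cases cs with
  | nil => rw [pvStripSign, bcore_nil]; rfl
  | cons c0 t =>
    simp only [List.head?_cons]
    rw [pvLoopA, hex_sets_eq]
    by_cases hs : c0 = '+' ∨ c0 = '-'
    · have hc0 : pvIsHex c0 = false := by rcases hs with rfl | rfl <;> decide
      rw [if_neg (by simp [hc0])]
      rw [if_neg (by rintro ⟨hd, -⟩; rcases hs with rfl | rfl <;> simp at hd)]
      rw [if_pos ⟨hs, rfl⟩]
      have hstrip : pvStripSign (c0 :: t) = t := by rw [pvStripSign]; simp [hs]
      rw [hstrip]
      cases t with
      | nil => rw [bcore_nil]; rfl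
      | cons c1 t2 =>
        rw [pvLoopA, hex_sets_eq]
        by_cases hc1 : pvIsHex c1 = true
        · rw [if_pos hc1]
          norm_num
          rw [loopA_main _ t2 2 1 (by omega) (by omega), bcore_hex c1 t2 hc1]
        · rw [if_neg hc1]
          by_cases hd : c1 = '.'
          · subst hd
            rw [bcore_dot]
            by_cases ht2 : t2 = []
            · subst ht2
              rw [if_neg (by rintro ⟨-, -, h, -⟩; exact h rfl),
                  if_neg (by rintro ⟨-, h⟩; exact one_ne_zero h)]
            · rw [if_pos ⟨rfl, rfl, ht2, one_ne_zero⟩,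
                  if_pos ⟨rfl, by rcases hs with rfl | rfl <;> simp⟩]
          · rw [if_neg (by rintro ⟨h, -⟩; exact hd h),
                if_neg (by rintro ⟨-, h⟩; exact one_ne_zero h),
                bcore_bad c1 t2 (by simpa using hc1) hd]
    · have hstrip : pvStripSign (c0 :: t) = c0 :: t := by rw [pvStripSign]; simp [hs]
      rw [hstrip]
      by_cases hc0 : pvIsHex c0 = true
      · rw [if_pos hc0]
        norm_num
        rw [loopA_main _ t 1 1 (by omega) (by
              rintro ⟨-, h⟩
              rcases h with h | h
              · exact hs (Or.inl (Option.some_inj.mp h))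
              · exact hs (Or.inr (Option.some_inj.mp h))),
            bcore_hex c0 t hc0]
      · rw [if_neg hc0]
        by_cases hd : c0 = '.'
        · subst hd
          rw [if_neg (by rintro ⟨-, -, -, h⟩; exact h rfl),
              if_neg (by rintro ⟨h, -⟩; exact hs h), bcore_dot]
        · rw [if_neg (by rintro ⟨h, -⟩; exact hd h),
              if_neg (by rintro ⟨h, -⟩; exact hs h),
              bcore_bad c0 t (by simpa using hc0) hd]

-- ===== VERDICT (by name: the statement is the Claim_ definition above) =====
theorem getNumberOfDigitsHexa_spec : Claim_equal_getNumberOfDigitsHexa := by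
  intro cad _
  unfold Spec_getNumberOfDigitsHexa getNumberOfDigitsHexa getNumberOfDigitsHexa_alt
  exact main_list ((PySem.Str.upper cad).toList)
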